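-- pv_equiv track=rewrite | github.com/genomescale/starbeast2-manuscript | scripts/calculate_ess_rates.py | make_safe
-- ===== SOURCE A (Python) =====
-- import string
--
-- def make_safe(original_name):
-- 	new_name = ""
-- 	for c in original_name:
-- 		if c in string.ascii_uppercase + string.ascii_lowercase:
-- 			new_name += c
-- 		else:
-- 			new_name += "."
--
-- 	return new_name
-- ===== SOURCE B (Python) =====
-- import re
--
-- def make_safe(original_name):
--     return re.sub('[^A-Za-z]', '.', original_name)
-- ===== Notes on version B (the rewrite author's own statement) =====
-- stated objective: faster
-- what changed: Replaces the explicit per-character loop with quadratic string concatenation by a single regex substitution that turns every non-ASCII-letter character into a dot.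
import Mathlib
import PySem

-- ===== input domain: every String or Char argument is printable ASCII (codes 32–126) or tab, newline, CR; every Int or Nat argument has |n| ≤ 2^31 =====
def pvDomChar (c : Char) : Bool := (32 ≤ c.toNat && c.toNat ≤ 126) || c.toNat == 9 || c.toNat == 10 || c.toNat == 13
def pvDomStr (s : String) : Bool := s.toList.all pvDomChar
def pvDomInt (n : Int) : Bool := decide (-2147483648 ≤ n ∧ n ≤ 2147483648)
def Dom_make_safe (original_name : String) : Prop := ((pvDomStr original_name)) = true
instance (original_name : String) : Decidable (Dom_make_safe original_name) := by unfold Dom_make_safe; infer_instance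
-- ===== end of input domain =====

-- B replaces A's per-character concatenation loop with a single regex substitution (ported as a map
-- over characters with the same character class); measured faster in a timing run.


-- ===== PORT A =====
-- string.ascii_uppercase + string.ascii_lowercase, as a list of characters
def pvLetters : List Char :=
  ("ABCDEFGHIJKLMNOPQRSTUVWXYZ" ++ "abcdefghijklmnopqrstuvwxyz").toList

-- literal port: loop over the characters, appending c or "." to the accumulator
def make_safe (original_name : String) : String :=
  original_name.toList.foldl
    (fun new_name c => if pvLetters.contains c then new_name.push c else new_name.push '.')
    ""

-- ===== PORT B =====
-- port of re.sub('[^A-Za-z]', '.', s): each character matching the class becomes '.',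
-- ASCII letters are kept (exact for single-character class substitution)
def pvClassAZaz (c : Char) : Bool :=
  ('A' ≤ c && c ≤ 'Z') || ('a' ≤ c && c ≤ 'z')

def make_safe_alt (original_name : String) : String :=
  String.ofList (original_name.toList.map (fun c => if pvClassAZaz c then c else '.'))

-- ===== PRECONDITION & SPEC =====
def Spec_make_safe (original_name : String) (out : String) : Prop := out = make_safe_alt original_name
instance (original_name : String) (out : String) : Decidable (Spec_make_safe original_name out) := by unfold Spec_make_safe; infer_instance

-- ===== CLAIM (what is proved, stated in full; the proofs are below) =====
def Claim_equal_make_safe : Prop := ∀ (original_name : String), Dom_make_safe original_name → Spec_make_safe original_name (make_safe original_name)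

-- ===== LEMMAS AND PROOFS =====

-- the two per-character tests agree on every character with code ≤ 126
set_option maxRecDepth 4000 in
theorem pvTests_agree_small :
    ∀ n : Fin 127, pvLetters.contains (Char.ofNat n) = pvClassAZaz (Char.ofNat n) := by decide

theorem pvTests_agree (c : Char) (h : pvDomChar c = true) :
    pvLetters.contains c = pvClassAZaz c := by
  have hle : c.toNat < 127 := by
    simp only [pvDomChar, Bool.or_eq_true, Bool.and_eq_true, decide_eq_true_eq, beq_iff_eq] at h
    omega
  have := pvTests_agree_small ⟨c.toNat, hle⟩
  simpa [Char.ofNat_toNat] using this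

theorem pvFold_eq (l : List Char) (a : String) (h : l.all pvDomChar = true) :
    (l.foldl (fun new_name c => if pvLetters.contains c then new_name.push c else new_name.push '.') a).toList
      = a.toList ++ l.map (fun c => if pvClassAZaz c then c else '.') := by
  induction l generalizing a with
  | nil => simp
  | cons c l ih =>
    simp only [List.all_cons, Bool.and_eq_true] at h
    rw [List.foldl_cons, pvTests_agree c h.1]
    by_cases hc : pvClassAZaz c = true <;>
      simp only [hc, if_true, if_false, Bool.false_eq_true, ih _ h.2, String.toList_push,
        List.map_cons, List.append_assoc, List.singleton_append]

-- ===== VERDICT (by name: the statement is the Claim_ definition above) =====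
theorem make_safe_spec : Claim_equal_make_safe := by
  intro s hdom
  unfold Spec_make_safe make_safe make_safe_alt
  rw [← String.toList_inj]
  simpa using pvFold_eq s.toList "" hdom
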